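-- pv_equiv track=rewrite | github.com/RBVI/ChimeraX | src/bundles/preset_mgr/src/cmd.py | text_match
-- ===== SOURCE A (Python) =====
-- def text_match(query, targets):
--     # priority:  exact match;  begins with query text;  contains query text
--     contains = []
--     begins_with = []
--     l_query = query.lower()
--     for target in targets:
--         l_target = target.lower()
--         if l_query == l_target:
--             return [target]
--         if l_target.startswith(l_query):
--             begins_with.append(target)
--         elif l_query in l_target:
--             contains.append(target)
--     if begins_with:
--         return begins_with
--     return contains
-- ===== SOURCE B (Python) =====
-- def text_match(query, targets):
--     l_query = query.lower()
--     for t in targets: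
--         if t.lower() == l_query:
--             return [t]
--     begins_with = [t for t in targets if t.lower().startswith(l_query)]
--     if begins_with:
--         return begins_with
--     return [t for t in targets
--             if l_query in t.lower() and not t.lower().startswith(l_query)]
-- ===== Notes on version B (the rewrite author's own statement) =====
-- stated objective: simpler
-- what changed: Replaces the single stateful loop with two accumulators by an exact-match scan plus two independent filter passes (begins-with, then contains-but-not-prefix).
import Mathlib
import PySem

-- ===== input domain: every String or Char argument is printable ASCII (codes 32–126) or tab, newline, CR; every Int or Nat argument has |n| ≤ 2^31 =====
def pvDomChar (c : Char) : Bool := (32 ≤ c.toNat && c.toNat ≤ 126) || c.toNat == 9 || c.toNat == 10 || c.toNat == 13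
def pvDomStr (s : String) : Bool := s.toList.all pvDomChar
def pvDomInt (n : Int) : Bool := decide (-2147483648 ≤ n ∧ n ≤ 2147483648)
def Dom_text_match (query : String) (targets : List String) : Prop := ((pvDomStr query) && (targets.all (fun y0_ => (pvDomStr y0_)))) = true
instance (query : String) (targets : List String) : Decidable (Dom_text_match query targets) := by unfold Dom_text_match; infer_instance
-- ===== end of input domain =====

-- B replaces A's single stateful categorizing loop by an exact-match scan plus two
-- independent filter passes; same results, no speed claim.

-- ===== PORT A =====
-- A's loop: accumulators `contains` and `begins_with`, early return on exact match.
def textMatchLoop (lq : String) (ts : List String)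
    (conts begins : List String) : List String :=
  match ts with
  | [] => if begins ≠ [] then begins else conts
  | t :: rest =>
    let lt := PySem.Str.lower t
    if lq == lt then [t]
    else if PySem.Str.startswith lt lq then textMatchLoop lq rest conts (begins ++ [t])
    else if PySem.Str.isIn lq lt then textMatchLoop lq rest (conts ++ [t]) begins
    else textMatchLoop lq rest conts begins

def text_match (query : String) (targets : List String) : List String :=
  textMatchLoop (PySem.Str.lower query) targets [] []

-- ===== PORT B =====
def text_match_alt (query : String) (targets : List String) : List String :=
  match targets.find? (fun t => PySem.Str.lower t == PySem.Str.lower query) with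
  | some t => [t]
  | none =>
    let begins_with := targets.filter
      (fun t => PySem.Str.startswith (PySem.Str.lower t) (PySem.Str.lower query))
    if begins_with ≠ [] then begins_with
    else targets.filter (fun t =>
      PySem.Str.isIn (PySem.Str.lower query) (PySem.Str.lower t) &&
        !(PySem.Str.startswith (PySem.Str.lower t) (PySem.Str.lower query)))

-- ===== PRECONDITION & SPEC =====
def Spec_text_match (query : String) (targets : List String) (out : List String) : Prop := out = text_match_alt query targets
instance (query : String) (targets : List String) (out : List String) : Decidable (Spec_text_match query targets out) := by unfold Spec_text_match; infer_instance

-- ===== CLAIM (what is proved, stated in full; the proofs are below) =====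
def Claim_equal_text_match : Prop := ∀ (query : String) (targets : List String), Dom_text_match query targets → Spec_text_match query targets (text_match query targets)

-- ===== LEMMAS AND PROOFS =====
lemma textMatchLoop_spec (lq : String) : ∀ (ts conts begins : List String),
    textMatchLoop lq ts conts begins =
      match ts.find? (fun t => PySem.Str.lower t == lq) with
      | some t => [t]
      | none =>
        if (begins ++ ts.filter (fun t => PySem.Str.startswith (PySem.Str.lower t) lq)).isEmpty then
          conts ++ ts.filter (fun t =>
            PySem.Str.isIn lq (PySem.Str.lower t) && !(PySem.Str.startswith (PySem.Str.lower t) lq))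
        else begins ++ ts.filter (fun t => PySem.Str.startswith (PySem.Str.lower t) lq) := by
  intro ts
  induction ts with
  | nil =>
    intro conts begins
    simp only [textMatchLoop, List.find?, List.filter_nil, List.append_nil]
    rcases begins with _ | ⟨b, bs⟩ <;> simp
  | cons t rest ih =>
    intro conts begins
    by_cases hq : lq = PySem.Str.lower t
    · simp [textMatchLoop, hq, List.find?]
    · have hq' : (PySem.Str.lower t == lq) = false := beq_eq_false_iff_ne.mpr (Ne.symm hq)
      have hq'' : (lq == PySem.Str.lower t) = false := beq_eq_false_iff_ne.mpr hq
      simp only [textMatchLoop, List.find?, hq', hq'', Bool.false_eq_true, if_false]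
      by_cases hs : PySem.Str.startswith (PySem.Str.lower t) lq = true
      · rw [if_pos hs, ih]
        cases hfind : rest.find? (fun t => PySem.Str.lower t == lq) with
        | some u => simp
        | none =>
          simp only [List.filter_cons, hs, if_true]
          rcases begins <;> simp [List.append_assoc]
      · rw [if_neg hs]
        have hsf : PySem.Str.startswith (PySem.Str.lower t) lq = false := Bool.eq_false_iff.mpr hs
        by_cases hc : PySem.Str.isIn lq (PySem.Str.lower t) = true
        · rw [if_pos hc, ih]
          cases hfind : rest.find? (fun t => PySem.Str.lower t == lq) with
          | some u => simp
          | none =>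
            simp only [List.filter_cons, hsf, hc, Bool.not_false, Bool.true_and,
              Bool.false_eq_true, if_false, if_true]
            split <;> simp [List.append_assoc]
        · rw [if_neg hc, ih]
          cases hfind : rest.find? (fun t => PySem.Str.lower t == lq) with
          | some u => simp
          | none =>
            have hcf : PySem.Str.isIn lq (PySem.Str.lower t) = false := Bool.eq_false_iff.mpr hc
            simp only [List.filter_cons, hsf, hcf, Bool.false_and, Bool.false_eq_true, if_false]

-- ===== VERDICT (by name: the statement is the Claim_ definition above) =====
theorem text_match_spec : Claim_equal_text_match := by
  intro query targets _
  unfold Spec_text_match text_match text_match_alt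
  rw [textMatchLoop_spec]
  cases hfind : targets.find? (fun t => PySem.Str.lower t == PySem.Str.lower query) with
  | some u => rfl
  | none =>
    simp only [List.nil_append, List.isEmpty_iff, ne_eq, List.filter_eq_nil_iff]
    split_ifs <;> rfl
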